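-- pv_equiv track=rewrite | github.com/ishayankoo001/python-exercises | 36/solution.py | es36
-- ===== SOURCE A (Python) =====
-- def es36(dictionariesList):
--     # I have to find the set of keys that appear in all dictionaries
--     # I initialize it with the keys of the first dictionary
--     keys = set(dictionariesList[0].keys())
--     # and I update it by making the intersection with the key set of each of the other dictionaries
--     for d in dictionariesList[1:]:
--         keys = keys.intersection(d.keys())
--     # so I repeat on the values the same mechanism only for the obtained keys
--     # I initialize all the key values with the value sets of the first dictionary
--     diz = {k: set(v) for k, v in dictionariesList[0].items() if k in keys}
--     # and then for each dictionary and for each key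
--     for d in dictionariesList[1:]:
--         for k, v in d.items():
--             if k in diz:
--                 # I update the values keeping only the common values (intersection)
--                 diz[k] = diz[k].intersection(v)
--     # at the end I order the values associated to each key (obtaining ordered lists)
--     return {k: sorted(v) for k, v in diz.items()}
-- ===== SOURCE B (Python) =====
-- def es36(dictionariesList):
--     # Counting algorithm: tally, over all dicts, how many dicts contain each key
--     # and each (key, value) pair; a key/value survives iff its tally equals len(dicts).
--     n = len(dictionariesList)
--     keycount = {}
--     paircount = {}
--     for d in dictionariesList:
--         for k, v in d.items():
--             keycount[k] = keycount.get(k, 0) + 1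
--             for x in set(v):
--                 paircount[(k, x)] = paircount.get((k, x), 0) + 1
--     return {k: sorted(x for x in set(v) if paircount[(k, x)] == n)
--             for k, v in dictionariesList[0].items() if keycount[k] == n}
-- ===== Notes on version B (the rewrite author's own statement) =====
-- stated objective: alternative
-- what changed: B replaces A's iterated set intersections with a counting algorithm: one pass tallies, for every key and every (key,value) pair, in how many dictionaries it occurs, and a key/value is kept iff its tally equals the number of dictionaries; no intersection operation is performed at all.
import Mathlib
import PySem

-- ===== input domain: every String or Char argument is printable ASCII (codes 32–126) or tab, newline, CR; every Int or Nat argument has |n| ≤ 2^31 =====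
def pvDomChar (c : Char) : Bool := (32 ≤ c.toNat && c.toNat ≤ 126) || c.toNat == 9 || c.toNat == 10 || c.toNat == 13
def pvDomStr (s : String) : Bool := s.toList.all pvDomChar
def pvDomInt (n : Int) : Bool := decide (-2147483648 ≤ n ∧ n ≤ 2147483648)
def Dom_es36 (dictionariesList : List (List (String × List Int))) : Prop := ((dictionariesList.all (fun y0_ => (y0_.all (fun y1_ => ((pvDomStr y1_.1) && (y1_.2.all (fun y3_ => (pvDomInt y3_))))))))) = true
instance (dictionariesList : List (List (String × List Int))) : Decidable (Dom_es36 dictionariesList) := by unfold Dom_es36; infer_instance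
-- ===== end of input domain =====

-- B replaces A's iterated set intersections with a counting algorithm: one pass tallies how many
-- dictionaries contain each key and each (key, value) pair; a key/value is kept iff its tally
-- equals the number of dictionaries (objective: alternative algorithm, no intersections at all).

-- ===== PORT A =====
def es36 (dictionariesList : List (List (String × List Int))) : List (String × List Int) :=
  match dictionariesList with
  | [] => []  -- Python raises IndexError here (dictionariesList[0]); excluded by Pre_es36
  | l0 :: ls =>
    let d0 := PySem.Dict.ofList l0
    let rest := ls.map (fun l => PySem.Dict.ofList l)
    let keys : PySem.Set String :=
      rest.foldl (fun ks d => PySem.Set.inter ks d.keys) (PySem.Set.ofList d0.keys)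
    let diz : PySem.Dict String (PySem.Set Int) :=
      d0.items.foldl (fun dz kv =>
        if PySem.Set.contains keys kv.1 then dz.insert kv.1 (PySem.Set.ofList kv.2) else dz)
        PySem.Dict.empty
    let diz2 := rest.foldl (fun dz d =>
        d.items.foldl (fun dz kv =>
          if dz.contains kv.1 then dz.insert kv.1 (PySem.Set.inter (dz.getD kv.1 []) kv.2)
          else dz) dz) diz
    (diz2.items.foldl (fun out p => out.insert p.1 (PySem.List.sorted p.2 (fun x => x) false))
      PySem.Dict.empty).items

-- ===== PORT B =====
def es36_alt (dictionariesList : List (List (String × List Int))) : List (String × List Int) :=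
  match dictionariesList with
  | [] => []  -- Python raises IndexError here (dictionariesList[0]); excluded by Pre_es36
  | l0 :: _ =>
    let n : Int := dictionariesList.length
    let counts :=
      dictionariesList.foldl (fun s l =>
        (PySem.Dict.ofList l).items.foldl (fun s kv =>
          (s.1.insert kv.1 (s.1.getD kv.1 0 + 1),
           (PySem.Set.ofList kv.2).foldl
             (fun pc x => pc.insert (kv.1, x) (pc.getD (kv.1, x) 0 + 1)) s.2)) s)
        ((PySem.Dict.empty : PySem.Dict String Int),
         (PySem.Dict.empty : PySem.Dict (String × Int) Int))
    let keycount := counts.1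
    let paircount := counts.2
    ((PySem.Dict.ofList l0).items.foldl (fun out kv =>
        if keycount.getD kv.1 0 == n then
          out.insert kv.1 (PySem.List.sorted
            ((PySem.Set.ofList kv.2).filter (fun x => paircount.getD (kv.1, x) 0 == n))
            (fun x => x) false)
        else out) PySem.Dict.empty).items

-- ===== PRECONDITION & SPEC =====
-- Pre_ excludes only the empty list, on which A raises IndexError.
def Pre_es36 (dictionariesList : List (List (String × List Int))) : Prop :=
  dictionariesList ≠ []
instance (dictionariesList : List (List (String × List Int))) : Decidable (Pre_es36 dictionariesList) := by unfold Pre_es36; infer_instance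
def pvWitness_es36 : (List (List (String × List Int))) := [[("a", [2, 1])], [("a", [1, 3]), ("b", [4])]]
def Spec_es36 (dictionariesList : List (List (String × List Int))) (out : List (String × List Int)) : Prop := out = es36_alt dictionariesList
instance (dictionariesList : List (List (String × List Int))) (out : List (String × List Int)) : Decidable (Spec_es36 dictionariesList out) := by unfold Spec_es36; infer_instance

-- ===== CLAIM (what is proved, stated in full; the proofs are below) =====
def Claim_equal_es36 : Prop := ∀ (dictionariesList : List (List (String × List Int))), Dom_es36 dictionariesList → Pre_es36 dictionariesList → Spec_es36 dictionariesList (es36 dictionariesList)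

-- ===== LEMMAS AND PROOFS =====

-- A's running key-set intersection is the filter by "present in every later dict".
theorem keysFold_eq_filter (rest : List (PySem.Dict String (List Int))) :
    ∀ (s : List String),
      rest.foldl (fun ks d => PySem.Set.inter ks d.keys) s
        = s.filter (fun k => rest.all (fun d => d.contains k)) := by
  induction rest with
  | nil => intro s; simp
  | cons d t ih =>
      intro s
      rw [List.foldl_cons, ih, PySem.Set.inter, List.filter_filter]
      apply List.filter_congr
      intro k _
      rw [Bool.eq_iff_iff]
      simp [List.all_cons, PySem.Set.contains,
        PySem.Dict.contains_iff_mem_keys, and_comm]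

-- A's running per-key value intersection is the filter by "present in every later dict's value".
theorem valsFold_eq_filter (k : String) (rest : List (PySem.Dict String (List Int))) :
    ∀ (s : List Int),
      rest.foldl (fun s d => PySem.Set.inter s (d.getD k [])) s
        = s.filter (fun x => rest.all (fun d => (d.getD k []).contains x)) := by
  induction rest with
  | nil => intro s; simp
  | cons d t ih =>
      intro s
      rw [List.foldl_cons, ih, PySem.Set.inter, List.filter_filter]
      apply List.filter_congr
      intro x _
      rw [Bool.eq_iff_iff]
      simp [List.all_cons, PySem.Set.contains, and_comm]

-- A's filtered dict comprehension appends the kept pairs in order.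
theorem build_items (p : String → Bool) (f : String × List Int → PySem.Set Int) :
    ∀ (l : List (String × List Int)) (dz : PySem.Dict String (PySem.Set Int)),
      (l.map Prod.fst).Nodup → (∀ kv ∈ l, dz.contains kv.1 = false) →
      (l.foldl (fun dz kv => if p kv.1 then dz.insert kv.1 (f kv) else dz) dz).items
        = dz.items ++ (l.filter (fun kv => p kv.1)).map (fun kv => (kv.1, f kv)) := by
  intro l
  induction l with
  | nil => intro dz _ _; simp
  | cons kv t ih =>
      intro dz hnd hfresh
      simp only [List.foldl_cons, List.filter_cons]
      by_cases hp : p kv.1 = true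
      · rw [if_pos hp, if_pos hp]
        have hfr : dz.contains kv.1 = false := hfresh kv (by simp)
        have hfresh' : ∀ kv' ∈ t, (dz.insert kv.1 (f kv)).contains kv'.1 = false := by
          intro kv' hkv'
          rw [PySem.Dict.contains_insert]
          have hne : kv'.1 ≠ kv.1 := by
            have := (List.nodup_cons.mp hnd).1
            intro h; exact this (h ▸ List.mem_map_of_mem hkv')
          simp [hne, hfresh kv' (by simp [hkv'])]
        rw [ih _ (List.nodup_cons.mp hnd).2 hfresh',
          PySem.Dict.items_insert_of_not_contains _ _ hfr]
        simp
      · rw [if_neg hp, if_neg hp]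
        exact ih dz (List.nodup_cons.mp hnd).2 (fun kv' h => hfresh kv' (by simp [h]))

-- One pass of A's update loop over a dict's items rewrites every stored value in place.
theorem inner_items :
    ∀ (l : List (String × List Int)) (dz : PySem.Dict String (PySem.Set Int)),
      dz.keys.Nodup → (l.map Prod.fst).Nodup →
      (l.foldl (fun dz kv =>
          if dz.contains kv.1 then dz.insert kv.1 (PySem.Set.inter (dz.getD kv.1 []) kv.2)
          else dz) dz).items
        = dz.items.map (fun q =>
            match (l.find? (fun kv => kv.1 == q.1)).map Prod.snd with
            | some v => (q.1, PySem.Set.inter q.2 v)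
            | none => q) := by
  intro l
  induction l with
  | nil => intro dz _ _; simp
  | cons kv t ih =>
      intro dz hdz hl
      simp only [List.foldl_cons]
      by_cases hc : dz.contains kv.1 = true
      · rw [if_pos hc]
        have hkeys : (dz.insert kv.1 (PySem.Set.inter (dz.getD kv.1 []) kv.2)).keys = dz.keys :=
          PySem.Dict.keys_insert_of_contains _ _ hc
        rw [ih _ (hkeys ▸ hdz) (List.nodup_cons.mp hl).2,
          PySem.Dict.items_insert_of_contains _ _ hc, List.map_map]
        apply List.map_congr_left
        intro q hq
        by_cases hqk : q.1 = kv.1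
        · have hv : dz.getD kv.1 [] = q.2 := by
            have : (kv.1, q.2) ∈ dz.items := by
              have : q = (kv.1, q.2) := by rw [← hqk]
              exact this ▸ hq
            exact PySem.Dict.getD_of_mem_items _ this hdz []
          have hnot : t.find? (fun kv' => kv'.1 == kv.1) = none := by
            rw [List.find?_eq_none]
            intro x hx hbeq
            exact (List.nodup_cons.mp hl).1
              ((beq_iff_eq.mp hbeq) ▸ List.mem_map_of_mem hx)
          simp [Function.comp, hqk, hv, hnot]
        · have hbeq : (kv.1 == q.1) = false := by simp [Ne.symm hqk]
          simp [Function.comp, hqk, hbeq]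
      · rw [if_neg (by simp [hc])]
        rw [ih _ hdz (List.nodup_cons.mp hl).2]
        apply List.map_congr_left
        intro q hq
        have hne : (kv.1 == q.1) = false := by
          rw [beq_eq_false_iff_ne]
          intro heq
          apply hc
          simp only [PySem.Dict.contains, List.any_eq_true]
          exact ⟨q, hq, by simp [← heq]⟩
        simp [hne]

-- A's whole second loop folds, per key, the value intersection across the later dicts.
theorem outer_items :
    ∀ (rest : List (PySem.Dict String (List Int))) (dz : PySem.Dict String (PySem.Set Int)),
      (∀ d ∈ rest, d.keys.Nodup) → dz.keys.Nodup →
      (rest.foldl (fun dz d =>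
          d.items.foldl (fun dz kv =>
            if dz.contains kv.1 then dz.insert kv.1 (PySem.Set.inter (dz.getD kv.1 []) kv.2)
            else dz) dz) dz).items
        = dz.items.map (fun q =>
            (q.1, rest.foldl (fun s d =>
                match d.get? q.1 with
                | some v => PySem.Set.inter s v
                | none => s) q.2)) := by
  intro rest
  induction rest with
  | nil => intro dz _ _; simp
  | cons d t ih =>
      intro dz hr hdz
      simp only [List.foldl_cons]
      have h1 := inner_items d.items dz hdz (hr d (by simp))
      have hkeys : (d.items.foldl (fun dz kv =>
          if dz.contains kv.1 then dz.insert kv.1 (PySem.Set.inter (dz.getD kv.1 []) kv.2)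
          else dz) dz).keys = dz.keys := by
        simp only [PySem.Dict.keys, h1, List.map_map]
        apply List.map_congr_left
        intro q _
        rcases h : (d.items.find? (fun kv => kv.1 == q.1)).map Prod.snd with _ | v <;>
          simp [Function.comp, h]
      rw [ih _ (fun d' hd' => hr d' (by simp [hd'])) (hkeys ▸ hdz), h1, List.map_map]
      apply List.map_congr_left
      intro q _
      have hget : d.get? q.1 = (d.items.find? (fun kv => kv.1 == q.1)).map Prod.snd := rfl
      rcases h : (d.items.find? (fun kv => kv.1 == q.1)).map Prod.snd with _ | v <;>
        simp [Function.comp, hget, h]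

-- Building a dict over fresh distinct keys and reading items back is a map.
theorem out_items {β : Type} (l : List β) (k : β → String) (g : β → List Int)
    (hnd : (l.map k).Nodup) :
    (l.foldl (fun out b => out.insert (k b) (g b)) PySem.Dict.empty).items
      = l.map (fun b => (k b, g b)) := by
  have := PySem.Dict.items_foldl_insert_fresh l k g PySem.Dict.empty
    (fun a _ => by simp) hnd
  simpa using this

-- B's key-count loop over one dict's items, read back at any key.
theorem kcStep_getD (items : List (String × List Int)) (kc : PySem.Dict String Int)
    (k : String) :
    (items.foldl (fun kc kv => kc.insert kv.1 (kc.getD kv.1 0 + 1)) kc).getD k 0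
      = kc.getD k 0 + ((items.map Prod.fst).count k : Int) := by
  have h : (items.map Prod.fst).foldl
      (fun (kc : PySem.Dict String Int) (x : String) => kc.insert x (kc.getD x 0 + 1)) kc
      = items.foldl (fun kc kv => kc.insert kv.1 (kc.getD kv.1 0 + 1)) kc := List.foldl_map
  rw [← h, PySem.Dict.getD_foldl_insert_add_one]

-- counting a pair (k, x) in a constant-first-component pairing
theorem count_pair_map (a k : String) (x : Int) (l : List Int) :
    (l.map (fun y => (a, y))).count (k, x) = if a = k then l.count x else 0 := by
  induction l with
  | nil => simp
  | cons y t ih =>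
      by_cases h : a = k
      · subst h
        by_cases h2 : y = x <;> simp [ih, h2, Prod.ext_iff]
      · simp [ih, h, Prod.ext_iff]

-- B's pair-count loop over one dict's items, read back at any pair (first-match form).
theorem pcStep_getD (k : String) (x : Int) :
    ∀ (items : List (String × List Int)) (pc : PySem.Dict (String × Int) Int),
      (items.map Prod.fst).Nodup →
      (items.foldl (fun pc kv =>
          (PySem.Set.ofList kv.2).foldl
            (fun pc y => pc.insert (kv.1, y) (pc.getD (kv.1, y) 0 + 1)) pc) pc).getD (k, x) 0
        = pc.getD (k, x) 0 +
          (match (items.find? (fun kv => kv.1 == k)).map Prod.snd with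
           | some v => if (PySem.Set.ofList v).contains x then (1 : Int) else 0
           | none => 0) := by
  intro items
  induction items with
  | nil => intro pc _; simp
  | cons kv t ih =>
      intro pc hnd
      simp only [List.foldl_cons]
      have hinner : ((PySem.Set.ofList kv.2).foldl
            (fun pc y => pc.insert (kv.1, y) (pc.getD (kv.1, y) 0 + 1)) pc).getD (k, x) 0
          = pc.getD (k, x) 0
            + (((PySem.Set.ofList kv.2).map (fun y => (kv.1, y))).count (k, x) : Int) := by
        rw [show ((PySem.Set.ofList kv.2).foldl
              (fun pc y => pc.insert (kv.1, y) (pc.getD (kv.1, y) 0 + 1)) pc)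
            = (((PySem.Set.ofList kv.2).map (fun y => (kv.1, y))).foldl
              (fun pc z => pc.insert z (pc.getD z 0 + 1)) pc)
            from (List.foldl_map (f := fun y => (kv.1, y))
              (g := fun (pc : PySem.Dict (String × Int) Int) (z : String × Int) => pc.insert z (pc.getD z 0 + 1))).symm,
          PySem.Dict.getD_foldl_insert_add_one]
      by_cases hk : kv.1 = k
      · have hfind : t.find? (fun kv' => kv'.1 == k) = none := by
          rw [List.find?_eq_none]
          intro p hp hbeq
          exact (List.nodup_cons.mp hnd).1
            ((hk ▸ beq_iff_eq.mp hbeq) ▸ List.mem_map_of_mem hp)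
        rw [ih _ (List.nodup_cons.mp hnd).2, hinner, count_pair_map, if_pos hk]
        have hcnt : (PySem.Set.ofList kv.2).count x
            = if (PySem.Set.ofList kv.2).contains x then 1 else 0 := by
          by_cases hx : x ∈ PySem.Set.ofList kv.2
          · rw [List.count_eq_one_of_mem (PySem.Set.nodup_ofList kv.2) hx]
            simp [List.contains_iff_mem, hx]
          · rw [List.count_eq_zero.mpr hx]
            simp [List.contains_iff_mem, hx]
        simp only [List.find?_cons, show (kv.1 == k) = true by simp [hk], hfind, hcnt]
        by_cases hx : (PySem.Set.ofList kv.2).contains x = true <;>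
          simp [hx] <;> omega
      · rw [ih _ (List.nodup_cons.mp hnd).2, hinner, count_pair_map, if_neg hk]
        simp only [List.find?_cons, show (kv.1 == k) = false by simp [hk]]
        push_cast; ring

-- B's whole tallying pass: the key counter counts the dictionaries containing the key.
theorem kcTotal (k : String) :
    ∀ (L : List (List (String × List Int))) (kc : PySem.Dict String Int),
      (L.foldl (fun kc l => (PySem.Dict.ofList l).items.foldl
          (fun kc kv => kc.insert kv.1 (kc.getD kv.1 0 + 1)) kc) kc).getD k 0
        = kc.getD k 0 + (L.countP (fun l => (PySem.Dict.ofList l).contains k) : Int) := by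
  intro L
  induction L with
  | nil => intro kc; simp
  | cons l t ih =>
      intro kc
      rw [List.foldl_cons, ih, kcStep_getD, List.countP_cons]
      have : ((PySem.Dict.ofList l).items.map Prod.fst).count k
          = if (PySem.Dict.ofList l).contains k then 1 else 0 := by
        have hnd : ((PySem.Dict.ofList l).items.map Prod.fst).Nodup :=
          PySem.Dict.nodup_keys_ofList l
        by_cases h : (PySem.Dict.ofList l).contains k = true
        · have hm : k ∈ (PySem.Dict.ofList l).items.map Prod.fst :=
            (PySem.Dict.contains_iff_mem_keys _ _).mp h
          rw [List.count_eq_one_of_mem hnd hm]; simp [h]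
        · have hm : k ∉ (PySem.Dict.ofList l).items.map Prod.fst := by
            intro hm; exact h ((PySem.Dict.contains_iff_mem_keys _ _).mpr hm)
          rw [List.count_eq_zero.mpr hm]; simp [h]
        
      rw [this]
      split <;> push_cast <;> ring

-- B's whole tallying pass: the pair counter counts the dictionaries containing key AND value.
theorem pcTotal (k : String) (x : Int) :
    ∀ (L : List (List (String × List Int))) (pc : PySem.Dict (String × Int) Int),
      (L.foldl (fun pc l => (PySem.Dict.ofList l).items.foldl (fun pc kv =>
          (PySem.Set.ofList kv.2).foldl
            (fun pc y => pc.insert (kv.1, y) (pc.getD (kv.1, y) 0 + 1)) pc) pc) pc).getD (k, x) 0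
        = pc.getD (k, x) 0 + (L.countP (fun l => (PySem.Dict.ofList l).contains k
            && (PySem.Set.ofList ((PySem.Dict.ofList l).getD k [])).contains x) : Int) := by
  intro L
  induction L with
  | nil => intro pc; simp
  | cons l t ih =>
      intro pc
      rw [List.foldl_cons, ih, pcStep_getD k x _ _ (PySem.Dict.nodup_keys_ofList l),
        List.countP_cons]
      have hget : (PySem.Dict.ofList l).get? k
          = ((PySem.Dict.ofList l).items.find? (fun kv => kv.1 == k)).map Prod.snd := rfl
      rcases h : ((PySem.Dict.ofList l).items.find? (fun kv => kv.1 == k)).map Prod.snd with _ | v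
      · have hc : (PySem.Dict.ofList l).contains k = false := by
          rw [PySem.Dict.contains_eq_isSome_get?, hget, h]; rfl
        simp [h, hc]
      · have hgv : (PySem.Dict.ofList l).get? k = some v := by rw [hget, h]
        have hc : (PySem.Dict.ofList l).contains k = true := by
          rw [PySem.Dict.contains_eq_isSome_get?, hgv]; rfl
        have hgd : (PySem.Dict.ofList l).getD k [] = v :=
          PySem.Dict.getD_of_get?_eq_some _ _ hgv
        simp only [h, hc, hgd, Bool.true_and]
        split <;> push_cast <;> ring

-- B's single tallying loop with a pair of counters is the pair of the two tallying loops.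
theorem counts_split :
    ∀ (L : List (List (String × List Int))) (a : PySem.Dict String Int)
      (b : PySem.Dict (String × Int) Int),
      L.foldl (fun s l =>
        (PySem.Dict.ofList l).items.foldl (fun s kv =>
          (s.1.insert kv.1 (s.1.getD kv.1 0 + 1),
           (PySem.Set.ofList kv.2).foldl
             (fun pc x => pc.insert (kv.1, x) (pc.getD (kv.1, x) 0 + 1)) s.2)) s) (a, b)
      = (L.foldl (fun kc l => (PySem.Dict.ofList l).items.foldl
            (fun kc kv => kc.insert kv.1 (kc.getD kv.1 0 + 1)) kc) a,
         L.foldl (fun pc l => (PySem.Dict.ofList l).items.foldl (fun pc kv =>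
            (PySem.Set.ofList kv.2).foldl
              (fun pc x => pc.insert (kv.1, x) (pc.getD (kv.1, x) 0 + 1)) pc) pc) b) := by
  intro L
  induction L with
  | nil => intro a b; rfl
  | cons l t ih =>
      intro a b
      simp only [List.foldl_cons]
      rw [PySem.List.foldl_prod_mk
          (f := fun (kc : PySem.Dict String Int) (kv : String × List Int) =>
            kc.insert kv.1 (kc.getD kv.1 0 + 1))
          (g := fun (pc : PySem.Dict (String × Int) Int) (kv : String × List Int) =>
            (PySem.Set.ofList kv.2).foldl
              (fun pc x => pc.insert (kv.1, x) (pc.getD (kv.1, x) 0 + 1)) pc), ih]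

-- ===== VERDICT (by name: the statement is the Claim_ definition above) =====
theorem es36_spec : Claim_equal_es36 := by
  intro L _ hpre
  unfold Spec_es36
  match L with
  | [] => exact absurd rfl hpre
  | l0 :: ls =>
    simp only [es36, es36_alt]
    set d0 := PySem.Dict.ofList l0 with hd0
    set rest := ls.map (fun l => PySem.Dict.ofList l) with hrest
    have hrk : ∀ d ∈ rest, d.keys.Nodup := by
      intro d hd
      rw [hrest] at hd
      obtain ⟨l, _, rfl⟩ := List.mem_map.mp hd
      exact PySem.Dict.nodup_keys_ofList l
    have hnd0 : d0.keys.Nodup := PySem.Dict.nodup_keys_ofList l0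
    have hnditems : (d0.items.map Prod.fst).Nodup := hnd0
    set q : String → Bool := fun k => rest.all (fun d => d.contains k) with hq
    -- A side: reduce to a map over the filtered items of the first dict
    have hkeys : rest.foldl (fun ks d => PySem.Set.inter ks d.keys) (PySem.Set.ofList d0.keys)
        = d0.keys.filter q := by
      rw [PySem.Set.ofList_eq_self_of_nodup _ hnd0, keysFold_eq_filter]
    have hcontains : ∀ kv ∈ d0.items,
        PySem.Set.contains (d0.keys.filter q) kv.1 = q kv.1 := by
      intro kv hkv
      have hmem : kv.1 ∈ d0.keys := List.mem_map_of_mem hkv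
      rw [Bool.eq_iff_iff]
      simp only [PySem.Set.contains, List.contains_iff_mem, List.mem_filter]
      exact ⟨fun h => h.2, fun h => ⟨hmem, h⟩⟩
    rw [hkeys]
    have hbuild := build_items (fun k => PySem.Set.contains (d0.keys.filter q) k)
      (fun kv => PySem.Set.ofList kv.2) d0.items PySem.Dict.empty hnditems (fun kv _ => by simp)
    set dizA := d0.items.foldl (fun dz kv =>
        if PySem.Set.contains (d0.keys.filter q) kv.1 then dz.insert kv.1 (PySem.Set.ofList kv.2)
        else dz) (PySem.Dict.empty : PySem.Dict String (PySem.Set Int)) with hdizA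
    have hitems0 : dizA.items = (d0.items.filter (fun kv => q kv.1)).map
        (fun kv => (kv.1, PySem.Set.ofList kv.2)) := by
      rw [hbuild, List.filter_congr hcontains]
      simp [PySem.Dict.empty]
    have hdizAnd : dizA.keys.Nodup := by
      simp only [PySem.Dict.keys, hitems0, List.map_map]
      have : ((d0.items.filter (fun kv => q kv.1)).map
          ((fun x => x.1) ∘ (fun kv => (kv.1, PySem.Set.ofList kv.2))))
          = (d0.items.filter (fun kv => q kv.1)).map Prod.fst := by
        apply List.map_congr_left; intro kv _; rfl
      rw [this]
      exact hnditems.sublist (List.Sublist.map Prod.fst (List.filter_sublist))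
    rw [outer_items rest dizA hrk hdizAnd]
    rw [out_items (dizA.items.map (fun q' =>
        (q'.1, rest.foldl (fun s d =>
            match d.get? q'.1 with
            | some v => PySem.Set.inter s v
            | none => s) q'.2))) Prod.fst
      (fun p => PySem.List.sorted p.2 (fun x => x) false) ?hnd1]
    case hnd1 =>
      simp only [List.map_map]
      have : (dizA.items.map (Prod.fst ∘ (fun q' =>
          (q'.1, rest.foldl (fun s d =>
              match d.get? q'.1 with
              | some v => PySem.Set.inter s v
              | none => s) q'.2)))) = dizA.items.map Prod.fst := by
        apply List.map_congr_left; intro p _; rfl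
      rw [this]
      exact hdizAnd
    -- B side: split the counters and reduce the output loop to a map over filtered items
    rw [counts_split]
    set kcF := (l0 :: ls).foldl (fun kc l => (PySem.Dict.ofList l).items.foldl
        (fun kc kv => kc.insert kv.1 (kc.getD kv.1 0 + 1)) kc)
        (PySem.Dict.empty : PySem.Dict String Int) with hkcF
    set pcF := (l0 :: ls).foldl (fun pc l => (PySem.Dict.ofList l).items.foldl (fun pc kv =>
        (PySem.Set.ofList kv.2).foldl
          (fun pc x => pc.insert (kv.1, x) (pc.getD (kv.1, x) 0 + 1)) pc) pc)
        (PySem.Dict.empty : PySem.Dict (String × Int) Int) with hpcF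
    set nI : Int := ((l0 :: ls).length : Int) with hnI
    rw [PySem.List.foldl_if_eq_foldl_filter]
    have hBfilter : d0.items.filter (fun kv => (kcF, pcF).1.getD kv.1 0 == nI)
        = d0.items.filter (fun kv => q kv.1) := by
      apply List.filter_congr
      intro kv hkv
      have hc0 : (PySem.Dict.ofList l0).contains kv.1 = true :=
        (PySem.Dict.contains_iff_mem_keys _ _).mpr (List.mem_map_of_mem hkv)
      rw [hkcF, kcTotal, List.countP_cons, if_pos hc0]
      have hall : (ls.countP (fun l => (PySem.Dict.ofList l).contains kv.1) = ls.length)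
          ↔ (∀ l ∈ ls, (PySem.Dict.ofList l).contains kv.1 = true) :=
        List.countP_eq_length
      rw [Bool.eq_iff_iff, beq_iff_eq]
      simp only [hq, hrest, List.all_map, List.all_eq_true, Function.comp,
        PySem.Dict.getD_empty, hnI, List.length_cons]
      constructor
      · intro h
        exact hall.mp (by omega)
      · intro h
        have := hall.mpr h
        omega
    rw [hBfilter]
    rw [out_items (d0.items.filter (fun kv => q kv.1)) Prod.fst
      (fun kv => PySem.List.sorted
        ((PySem.Set.ofList kv.2).filter (fun x => (kcF, pcF).2.getD (kv.1, x) 0 == nI))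
        (fun x => x) false)
      (hnditems.sublist (List.Sublist.map Prod.fst (List.filter_sublist)))]
    rw [hitems0]
    simp only [List.map_map]
    apply List.map_congr_left
    intro kv hkv
    have hkvmem : kv ∈ d0.items := (List.mem_filter.mp hkv).1
    have hkvq : q kv.1 = true := (List.mem_filter.mp hkv).2
    have hall : ∀ d ∈ rest, d.contains kv.1 = true := by
      rw [hq] at hkvq
      exact List.all_eq_true.mp hkvq
    have hgetD0 : d0.getD kv.1 [] = kv.2 :=
      PySem.Dict.getD_of_mem_items d0 (show (kv.1, kv.2) ∈ d0.items by simpa using hkvmem) hnd0 []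
    simp only [Function.comp]
    congr 1
    -- the two value lists are equal
    have hmatch : ∀ (s : PySem.Set Int) (d : PySem.Dict String (List Int)), d ∈ rest →
        (match d.get? kv.1 with
         | some v => PySem.Set.inter s v
         | none => s) = PySem.Set.inter s (d.getD kv.1 []) := by
      intro s d hd
      obtain ⟨v, hv⟩ : ∃ v, d.get? kv.1 = some v := by
        have := PySem.Dict.contains_eq_isSome_get? (d := d) (k := kv.1)
        rw [hall d hd] at this
        exact Option.isSome_iff_exists.mp this.symm
      rw [hv, PySem.Dict.getD_of_get?_eq_some _ _ hv]
    rw [PySem.List.foldl_congr_mem rest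
        (fun s d => match d.get? kv.1 with
          | some v => PySem.Set.inter s v
          | none => s)
        (fun s d => PySem.Set.inter s (d.getD kv.1 []))
        (PySem.Set.ofList kv.2)
        (fun s d hd => hmatch s d hd),
      valsFold_eq_filter]
    congr 1
    apply List.filter_congr
    intro x hx
    have hx' : (PySem.Set.ofList kv.2).contains x = true := by
      simpa [List.contains_iff_mem] using hx
    have hx2 : x ∈ kv.2 := by simpa [PySem.Set.mem_ofList] using hx
    have hp0 : ((PySem.Dict.ofList l0).contains kv.1
        && (PySem.Set.ofList ((PySem.Dict.ofList l0).getD kv.1 [])).contains x) = true := by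
      rw [show (PySem.Dict.ofList l0) = d0 from rfl, hgetD0]
      simp [PySem.Set.mem_ofList, hx2,
        (PySem.Dict.contains_iff_mem_keys _ _).mpr (List.mem_map_of_mem hkvmem)]
    rw [Bool.eq_iff_iff, hpcF, pcTotal, List.countP_cons, if_pos hp0]
    have hcpl : (ls.countP (fun l => (PySem.Dict.ofList l).contains kv.1
          && (PySem.Set.ofList ((PySem.Dict.ofList l).getD kv.1 [])).contains x) = ls.length)
        ↔ (∀ l ∈ ls, ((PySem.Dict.ofList l).contains kv.1
          && (PySem.Set.ofList ((PySem.Dict.ofList l).getD kv.1 [])).contains x) = true) :=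
      List.countP_eq_length
    rw [beq_iff_eq]
    simp only [hrest, List.all_map, List.all_eq_true, Function.comp,
      PySem.Dict.getD_empty, hnI, List.length_cons]
    constructor
    · intro h
      have hc : List.countP (fun l => (PySem.Dict.ofList l).contains kv.1
          && (PySem.Set.ofList ((PySem.Dict.ofList l).getD kv.1 [])).contains x) ls
          = ls.length := by
        apply hcpl.mpr
        intro l hl
        have hcl : (PySem.Dict.ofList l).contains kv.1 = true :=
          hall _ (by rw [hrest]; exact List.mem_map_of_mem hl)
        have hx3 : x ∈ (PySem.Dict.ofList l).getD kv.1 [] := by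
          simpa [List.contains_iff_mem] using h l hl
        simp [hcl, PySem.Set.mem_ofList, hx3]
      omega
    · intro h l hl
      have hc : List.countP (fun l => (PySem.Dict.ofList l).contains kv.1
          && (PySem.Set.ofList ((PySem.Dict.ofList l).getD kv.1 [])).contains x) ls
          = ls.length := by omega
      have hmem := hcpl.mp hc l hl
      simp only [Bool.and_eq_true] at hmem
      simpa [List.contains_iff_mem, PySem.Set.mem_ofList] using hmem.2
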